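-- pv_equiv track=rewrite | github.com/vlang/raylib | scripts/raygen.py | c_type_to_v_type
-- ===== SOURCE A (Python) =====
-- varaidic_type_translations = {
-- 	"trace_log": "...TraceLogLevel",
-- 	"text_format": "...any"
-- }
--
-- c_to_v_types = {
-- 	"void": "",
-- 	"char": "u8",
-- 	"float": "f32",
-- 	"double": "f64",
-- 	"unsigned int": "u32",
-- 	"unsigned short": "u16",
-- 	"unsigned char": "u8",
-- 	"long": "i64",
-- 	"size_t": "C.size_t",
-- 	# Used by a trace log callback in raylib.h
-- 	"va_list": "C.va_list",
-- 	# Used in raylib.h to refer to raudio things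
-- 	"rAudioBuffer": "AudioBuffer",
-- 	"rAudioProcessor": "AudioProcessor",
-- 	"ma_context": "C.ma_context",
-- 	"ma_device": "C.ma_device",
-- 	"ma_mutex": "C.ma_mutex",
-- 	# From raymath.h
-- 	"float3": "Float3",
-- 	"float16": "Float16"
-- }
--
-- def c_type_to_v_type(c_type: str, method_name: str = None) -> str:
-- 	# Varaidic args are a pain because C does not declare types for them,
-- 	# meaning we need to handle them manually based on the method's name.
-- 	# Luckily, there are only **2** methods in the entire API that use
-- 	# varaidic arguments!
-- 	if c_type == "...":
-- 		return varaidic_type_translations[method_name]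
-- 	# We handle void here because it can be ambigious between no/ return
-- 	# value or a void pointer.
-- 	elif c_type == "void *" or c_type == "const void *":
-- 		return "voidptr"
--
-- 	# The final annoying thing we have to deal with are fixed-size array
-- 	# types.
-- 	sizes = []
-- 	if "[" in c_type:
-- 		dimensions = c_type.count("[")
-- 		sizes = c_type.replace("]", "").split("[")[1:]
-- 		c_type = c_type.split("[")[0]
--
-- 	pointers = c_type.count("*")
-- 	c_type = c_type.removeprefix("const ").replace("*", "").strip()
-- 	c_type = c_to_v_types.get(c_type, c_type)
-- 	c_type = ("&" * pointers) + c_type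
-- 	c_type = c_type.strip()
--
-- 	# If we are an array, we will add that to the V type
-- 	if len(sizes) > 0:
-- 		c_type = "".join([f"[{s}]" for s in sizes]) + c_type
--
-- 	return c_type
-- ===== SOURCE B (Python) =====
-- varaidic_type_translations = {
-- 	"trace_log": "...TraceLogLevel",
-- 	"text_format": "...any"
-- }
--
-- c_to_v_types = {
-- 	"void": "",
-- 	"char": "u8",
-- 	"float": "f32",
-- 	"double": "f64",
-- 	"unsigned int": "u32",
-- 	"unsigned short": "u16",
-- 	"unsigned char": "u8",
-- 	"long": "i64",
-- 	"size_t": "C.size_t",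
-- 	"va_list": "C.va_list",
-- 	"rAudioBuffer": "AudioBuffer",
-- 	"rAudioProcessor": "AudioProcessor",
-- 	"ma_context": "C.ma_context",
-- 	"ma_device": "C.ma_device",
-- 	"ma_mutex": "C.ma_mutex",
-- 	"float3": "Float3",
-- 	"float16": "Float16"
-- }
--
-- def c_type_to_v_type(c_type: str, method_name: str = None) -> str:
-- 	if c_type == "...":
-- 		return varaidic_type_translations[method_name]
-- 	if c_type == "void *" or c_type == "const void *":
-- 		return "voidptr"
-- 	# One left-to-right scan over a shared character iterator: count '*'
-- 	# and collect name characters until the first '[', then stream the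
-- 	# remaining characters straight into the "[dim]" prefix ('[' closes
-- 	# and reopens a group, ']' is dropped).
-- 	it = iter(c_type[6:] if c_type.startswith("const ") else c_type)
-- 	stars = 0
-- 	name = []
-- 	dims = []
-- 	for ch in it:
-- 		if ch == "[":
-- 			dims.append("[")
-- 			for ch2 in it:
-- 				if ch2 == "[":
-- 					dims.append("][")
-- 				elif ch2 != "]":
-- 					dims.append(ch2)
-- 			dims.append("]")
-- 			break
-- 		if ch == "*":
-- 			stars += 1
-- 		else:
-- 			name.append(ch)
-- 	base = "".join(name).strip()
-- 	return "".join(dims) + "&" * stars + c_to_v_types.get(base, base)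
-- ===== Notes on version B (the rewrite author's own statement) =====
-- stated objective: alternative
-- what changed: Replaces A's staged passes (count '[', replace ']', two splits, count '*', removeprefix, replace '*', join) by a single left-to-right scanner over one shared character iterator that simultaneously counts pointers, collects the base name, and streams the trailing dimension characters directly into the '[n]' prefix.
import Mathlib
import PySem

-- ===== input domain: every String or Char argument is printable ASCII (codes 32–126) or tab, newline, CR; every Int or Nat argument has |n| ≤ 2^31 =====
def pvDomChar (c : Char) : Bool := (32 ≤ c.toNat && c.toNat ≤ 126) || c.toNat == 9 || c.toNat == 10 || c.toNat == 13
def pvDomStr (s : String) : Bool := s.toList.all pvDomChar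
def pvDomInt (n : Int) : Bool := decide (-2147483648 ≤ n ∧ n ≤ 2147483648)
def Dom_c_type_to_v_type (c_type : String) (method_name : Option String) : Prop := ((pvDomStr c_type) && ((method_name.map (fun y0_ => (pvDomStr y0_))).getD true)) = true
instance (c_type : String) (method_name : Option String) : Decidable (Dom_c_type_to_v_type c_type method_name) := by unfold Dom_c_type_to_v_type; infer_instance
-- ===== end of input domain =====

-- B replaces A's staged passes (count/replace/split/split/count/removeprefix/replace/join)
-- by one left-to-right scanner that counts '*', collects the base name and streams the
-- trailing dimension characters directly into the "[n]" prefix (objective: alternative).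

-- ===== PORT A =====
def pvVaraidic : PySem.Dict String String :=
  PySem.Dict.ofList [("trace_log", "...TraceLogLevel"), ("text_format", "...any")]

def pvCToV : PySem.Dict String String :=
  PySem.Dict.ofList [("void", ""), ("char", "u8"), ("float", "f32"), ("double", "f64"),
    ("unsigned int", "u32"), ("unsigned short", "u16"), ("unsigned char", "u8"),
    ("long", "i64"), ("size_t", "C.size_t"), ("va_list", "C.va_list"),
    ("rAudioBuffer", "AudioBuffer"), ("rAudioProcessor", "AudioProcessor"),
    ("ma_context", "C.ma_context"), ("ma_device", "C.ma_device"), ("ma_mutex", "C.ma_mutex"),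
    ("float3", "Float3"), ("float16", "Float16")]

-- Python str.removeprefix, ported by hand (exact: s[len(p):] when s starts with p, else s)
def pyRemoveprefix (s p : String) : String :=
  if PySem.Str.startswith s p then String.ofList (s.toList.drop p.toList.length) else s

def c_type_to_v_type (c_type : String) (method_name : Option String) : String :=
  if c_type == "..." then
    -- varaidic_type_translations[method_name]; the KeyError cases (method_name None or
    -- unknown) are excluded by Pre_ (on them this port's .getD "" value is not claimed)
    ((match method_name with
      | some m => pvVaraidic.get? m
      | none => none).getD "")
  else if c_type == "void *" || c_type == "const void *" then "voidptr"
  else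
    let sizes : List String := []
    let st :=
      if PySem.Str.isIn "[" c_type then
        let _dimensions := PySem.Str.count c_type "["
        let sizes := PySem.List.slice ((PySem.Str.split? (PySem.Str.replace c_type "]" "") "[").getD []) (some 1) none
        let c_type := (PySem.List.pyGet? ((PySem.Str.split? c_type "[").getD []) 0).getD ""
        (sizes, c_type)
      else (sizes, c_type)
    let sizes := st.1
    let c_type := st.2
    let pointers := PySem.Str.count c_type "*"
    let c_type := PySem.Str.strip (PySem.Str.replace (pyRemoveprefix c_type "const ") "*" "")
    let c_type := pvCToV.getD c_type c_type
    let c_type := String.ofList (List.replicate pointers '&') ++ c_type   -- "&" * pointers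
    let c_type := PySem.Str.strip c_type
    if sizes.length > 0 then
      PySem.Str.join "" (sizes.map (fun s => "[" ++ s ++ "]")) ++ c_type
    else c_type

-- ===== PORT B =====
-- the inner iterator loop of Source B: stream the characters after the first '[' into the
-- "[dim]" prefix ('[' closes and reopens a group, ']' is dropped, end closes the group)
def pvAltDimsGo : List Char → List Char
  | [] => [']']
  | c :: t =>
    if c = '[' then ']' :: '[' :: pvAltDimsGo t
    else if c = ']' then pvAltDimsGo t
    else c :: pvAltDimsGo t

-- the outer iterator loop of Source B: count '*' and collect name chars until the first '['
def pvAltScan : List Char → Nat → List Char → Nat × List Char × List Char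
  | [], stars, kept => (stars, kept, [])
  | c :: t, stars, kept =>
    if c = '[' then (stars, kept, '[' :: pvAltDimsGo t)
    else if c = '*' then pvAltScan t (stars + 1) kept
    else pvAltScan t stars (kept ++ [c])

def c_type_to_v_type_alt (c_type : String) (method_name : Option String) : String :=
  if c_type == "..." then
    ((match method_name with
      | some m => pvVaraidic.get? m
      | none => none).getD "")
  else if c_type == "void *" || c_type == "const void *" then "voidptr"
  else
    let s := if PySem.Str.startswith c_type "const " then PySem.Str.slice c_type (some 6) none else c_type
    let r := pvAltScan s.toList 0 []
    let base := PySem.Str.strip (String.ofList r.2.1)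
    String.ofList r.2.2 ++ String.ofList (List.replicate r.1 '&') ++ pvCToV.getD base base

-- ===== PRECONDITION & SPEC =====
-- Pre_ excludes exactly the inputs on which A raises (KeyError): c_type == "..." with a
-- method_name other than "trace_log"/"text_format" (B raises the same KeyError there).
def Pre_c_type_to_v_type (c_type : String) (method_name : Option String) : Prop :=
  c_type = "..." → (method_name = some "trace_log" ∨ method_name = some "text_format")
instance (c_type : String) (method_name : Option String) : Decidable (Pre_c_type_to_v_type c_type method_name) := by unfold Pre_c_type_to_v_type; infer_instance

def pvWitness_c_type_to_v_type : String × Option String := ("const char *", none)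

def Spec_c_type_to_v_type (c_type : String) (method_name : Option String) (out : String) : Prop := out = c_type_to_v_type_alt c_type method_name
instance (c_type : String) (method_name : Option String) (out : String) : Decidable (Spec_c_type_to_v_type c_type method_name out) := by unfold Spec_c_type_to_v_type; infer_instance

-- ===== CLAIM (what is proved, stated in full; the proofs are below) =====
def Claim_equal_c_type_to_v_type : Prop := ∀ (c_type : String) (method_name : Option String), Dom_c_type_to_v_type c_type method_name → Pre_c_type_to_v_type c_type method_name → Spec_c_type_to_v_type c_type method_name (c_type_to_v_type c_type method_name)

-- ===== LEMMAS AND PROOFS =====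

-- count.go with a single-character pattern is List.count
lemma pv_countgo (c : Char) : ∀ (l : List Char) (fuel acc : Nat), l.length ≤ fuel →
    PySem.Chars.count.go [c] fuel l acc = acc + l.count c := by
  intro l
  induction l with
  | nil => intro fuel acc h; cases fuel <;> simp [PySem.Chars.count.go]
  | cons h t ih =>
    intro fuel acc hle
    cases fuel with
    | zero => simp at hle
    | succ f =>
      rw [PySem.Chars.count.go]
      simp only [List.isPrefixOf, Bool.and_true, List.length_cons] at *
      by_cases hc : c == h
      · simp only [hc, if_pos]
        rw [show List.drop ([].length + 1) (h :: t) = t from rfl]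
        rw [ih f (acc + 1) (by omega)]
        have : h = c := (beq_iff_eq.mp hc).symm
        simp [this]
        omega
      · simp only [hc]
        simp only [Bool.false_eq_true, if_false]
        rw [ih f acc (by omega)]
        have : ¬ h = c := fun e => by simp [e] at hc
        simp [this]

lemma pv_count_single (c : Char) (l : List Char) : PySem.Chars.count l [c] = l.count c := by
  have h := pv_countgo c l l.length 0 le_rfl
  simp [PySem.Chars.count] at h ⊢
  omega

-- replace.go of a single character by "" is List.filter
lemma pv_replacego (c : Char) : ∀ (l : List Char) (fuel : Nat) (acc : List Char), l.length ≤ fuel →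
    PySem.Chars.replace.go [c] [] fuel l acc = acc.reverse ++ l.filter (fun x => x ≠ c) := by
  intro l
  induction l with
  | nil => intro fuel acc h; cases fuel <;> simp [PySem.Chars.replace.go]
  | cons h t ih =>
    intro fuel acc hle
    cases fuel with
    | zero => simp at hle
    | succ f =>
      rw [PySem.Chars.replace.go]
      simp only [List.isPrefixOf, Bool.and_true, List.length_cons] at *
      by_cases hc : c == h
      · simp only [hc, if_pos]
        rw [show List.drop ([].length + 1) (h :: t) = t from rfl]
        rw [ih f _ (by omega)]
        have : h = c := (beq_iff_eq.mp hc).symm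
        simp [this]
      · simp only [hc]
        simp only [Bool.false_eq_true, if_false]
        rw [ih f _ (by omega)]
        have hne : ¬ h = c := fun e => by simp [e] at hc
        simp [hne]

lemma pv_replace_single (c : Char) (l : List Char) :
    PySem.Chars.replace l [c] [] = l.filter (fun x => x ≠ c) := by
  have h := pv_replacego c l l.length [] le_rfl
  simp [PySem.Chars.replace] at h ⊢
  exact h

-- structural form of splitOn with a single-character separator
def pvSplitC (c : Char) : List Char → List (List Char)
  | [] => [[]]
  | h :: t =>
    if h = c then [] :: pvSplitC c t
    else
      match pvSplitC c t with
      | [] => [[h]]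
      | s :: ss => (h :: s) :: ss

lemma pvSplitC_ne_nil (c : Char) (l : List Char) : pvSplitC c l ≠ [] := by
  induction l with
  | nil => simp [pvSplitC]
  | cons h t ih =>
    simp only [pvSplitC]
    split
    · simp
    · rcases he : pvSplitC c t with _ | ⟨s, ss⟩
      · simp
      · simp

lemma pv_splitOngo (c : Char) : ∀ (l : List Char) (fuel : Nat) (cur : List Char) (acc : List (List Char)),
    l.length < fuel →
    PySem.Chars.splitOn.go [c] fuel l cur acc =
      acc.reverse ++ (match pvSplitC c l with
        | [] => []
        | s :: ss => (cur.reverse ++ s) :: ss) := by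
  intro l
  induction l with
  | nil =>
    intro fuel cur acc h
    cases fuel with
    | zero => omega
    | succ f =>
      rw [PySem.Chars.splitOn.go]
      simp [pvSplitC]
      omega
  | cons h t ih =>
    intro fuel cur acc hlt
    cases fuel with
    | zero => omega
    | succ f =>
      rw [PySem.Chars.splitOn.go]
      simp only [List.isPrefixOf, Bool.and_true]
      rcases he : pvSplitC c t with _ | ⟨s, ss⟩
      · exact absurd he (pvSplitC_ne_nil c t)
      · by_cases hc : c == h
        · simp only [hc, if_pos]
          rw [show List.drop [c].length (h :: t) = t from rfl]
          rw [ih f [] (cur.reverse :: acc) (by simp at hlt ⊢; omega)]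
          have : h = c := (beq_iff_eq.mp hc).symm
          simp [pvSplitC, this, he]
        · simp only [hc]
          simp only [Bool.false_eq_true, if_false]
          rw [ih f (h :: cur) acc (by simp at hlt ⊢; omega)]
          have hne : ¬ h = c := fun e => by simp [e] at hc
          simp [pvSplitC, hne, he]

lemma pv_splitOn_single (c : Char) (l : List Char) :
    PySem.Chars.splitOn l [c] = pvSplitC c l := by
  have h := pv_splitOngo c l (l.length + 1) [] [] (by omega)
  rcases he : pvSplitC c l with _ | ⟨s, ss⟩
  · exact absurd he (pvSplitC_ne_nil c l)
  · simp [PySem.Chars.splitOn, he] at h ⊢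
    exact h

lemma pvSplitC_filter (c d : Char) (hcd : d ≠ c) (l : List Char) :
    pvSplitC c (l.filter (fun x => x ≠ d)) = (pvSplitC c l).map (List.filter (fun x => x ≠ d)) := by
  induction l with
  | nil => simp [pvSplitC]
  | cons a t ih =>
    rcases he : pvSplitC c t with _ | ⟨s, ss⟩
    · exact absurd he (pvSplitC_ne_nil c t)
    · rw [he] at ih
      by_cases had : a = d
      · subst had
        rw [List.filter_cons, if_neg (by simp)]
        rw [ih]
        simp [pvSplitC, if_neg hcd, he, List.filter_cons]
      · rw [List.filter_cons, if_pos (by simp [had])]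
        by_cases hac : a = c
        · simp only [pvSplitC, if_pos hac, he, List.map_cons]
          rw [ih]
          simp
        · simp only [pvSplitC, if_neg hac, he, List.map_cons]
          rw [ih]
          simp [List.filter_cons, had]

-- first-occurrence decomposition
lemma pv_first_bracket : ∀ (l : List Char), '[' ∈ l → ∃ pre post, l = pre ++ '[' :: post ∧ '[' ∉ pre := by
  intro l
  induction l with
  | nil => intro h; simp at h
  | cons a t ih =>
    intro h
    by_cases ha : a = '['
    · exact ⟨[], t, by simp [ha], by simp⟩
    · have hm : '[' ∈ t := by
        rcases List.mem_cons.mp h with e | e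
        · exact absurd (id e.symm : a = '[') ha
        · exact e
      obtain ⟨pre, post, he, hp⟩ := ih hm
      refine ⟨a :: pre, post, by simp [he], ?_⟩
      simp only [List.mem_cons, not_or]
      exact ⟨fun e => ha e.symm, hp⟩

lemma pvSplitC_decomp (pre post : List Char) (hp : '[' ∉ pre) :
    pvSplitC '[' (pre ++ '[' :: post) = pre :: pvSplitC '[' post := by
  induction pre with
  | nil => simp [pvSplitC]
  | cons a t ih =>
    simp only [List.mem_cons, not_or] at hp
    obtain ⟨h1, h2⟩ := hp
    simp only [List.cons_append, pvSplitC, ih h2]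
    rw [if_neg (fun e => h1 e.symm)]

-- the scanner on a bracket-free list
lemma pvAltScan_no_bracket : ∀ (l : List Char) (stars : Nat) (kept : List Char), '[' ∉ l →
    pvAltScan l stars kept = (stars + l.count '*', kept ++ l.filter (fun x => x ≠ '*'), []) := by
  intro l
  induction l with
  | nil => intro stars kept h; simp [pvAltScan]
  | cons a t ih =>
    intro stars kept h
    simp only [List.mem_cons, not_or] at h
    obtain ⟨h1, h2⟩ := h
    rw [pvAltScan, if_neg (fun e => h1 e.symm)]
    by_cases ha : a = '*'
    · rw [if_pos ha, ih (stars + 1) kept h2]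
      subst ha
      simp [List.count_cons, List.filter_cons]
      omega
    · rw [if_neg ha, ih stars (kept ++ [a]) h2]
      simp [List.count_cons, List.filter_cons, ha]

-- the scanner splits at the first '['
lemma pvAltScan_bracket : ∀ (pre : List Char) (post : List Char) (stars : Nat) (kept : List Char), '[' ∉ pre →
    pvAltScan (pre ++ '[' :: post) stars kept =
      (stars + pre.count '*', kept ++ pre.filter (fun x => x ≠ '*'), '[' :: pvAltDimsGo post) := by
  intro pre
  induction pre with
  | nil => intro post stars kept h; simp [pvAltScan]
  | cons a t ih =>
    intro post stars kept h
    simp only [List.mem_cons, not_or] at h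
    obtain ⟨h1, h2⟩ := h
    rw [List.cons_append, pvAltScan, if_neg (fun e => h1 e.symm)]
    by_cases ha : a = '*'
    · rw [if_pos ha, ih post (stars + 1) kept h2]
      subst ha
      simp [List.count_cons, List.filter_cons]
      omega
    · rw [if_neg ha, ih post stars (kept ++ [a]) h2]
      simp [List.count_cons, List.filter_cons, ha]

-- the dims loop produces exactly A's joined "[size]" groups
lemma pvAltDimsGo_eq : ∀ (t : List Char),
    pvAltDimsGo t =
      (match pvSplitC '[' t with
        | [] => []
        | s :: ss =>
          s.filter (fun x => x ≠ ']') ++ [']'] ++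
            ((ss.map (fun seg => '[' :: (seg.filter (fun x => x ≠ ']') ++ [']']))).flatten)) := by
  intro t
  induction t with
  | nil => simp [pvAltDimsGo, pvSplitC]
  | cons a r ih =>
    rcases he : pvSplitC '[' r with _ | ⟨s, ss⟩
    · exact absurd he (pvSplitC_ne_nil '[' r)
    · rw [he] at ih
      simp only [] at ih
      by_cases hab : a = '['
      · subst hab
        rw [pvAltDimsGo, if_pos rfl]
        simp only [pvSplitC, if_pos rfl, he, List.map_cons, List.flatten_cons]
        rw [ih]
        simp
      · by_cases hac : a = ']'
        · subst hac
          rw [pvAltDimsGo, if_neg (by decide), if_pos rfl]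
          simp only [pvSplitC, if_neg hab, he]
          rw [ih]
          simp [List.filter_cons]
        · rw [pvAltDimsGo, if_neg hab, if_neg hac]
          simp only [pvSplitC, if_neg hab, he]
          rw [ih, List.filter_cons, if_pos (by simp [hac])]
          simp

lemma pvAltDims_flatten (t : List Char) :
    '[' :: pvAltDimsGo t =
      ((pvSplitC '[' t).map (fun seg => '[' :: (seg.filter (fun x => x ≠ ']') ++ [']']))).flatten := by
  rcases he : pvSplitC '[' t with _ | ⟨s, ss⟩
  · exact absurd he (pvSplitC_ne_nil '[' t)
  · rw [pvAltDimsGo_eq, he]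
    simp

-- "const " prefix transfers between the whole string and its part before the first '['
lemma pv_const_transfer (pre post : List Char) :
    (("const " : String).toList <+: (pre ++ '[' :: post)) ↔ (("const " : String).toList <+: pre) := by
  constructor
  · rintro ⟨t, ht⟩
    rcases List.append_eq_append_iff.mp ht with ⟨a', ha1, _⟩ | ⟨c', hc1, hc2⟩
    · exact ⟨a', ha1.symm⟩
    · cases c' with
      | nil => exact ⟨[], by simp [hc1]⟩
      | cons x xs =>
        have hc2' : '[' :: post = x :: (xs ++ t) := by simpa using hc2
        have hx : '[' = x := (List.cons_eq_cons.mp hc2').1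
        have hmem : '[' ∈ ("const " : String).toList := by
          rw [hc1, ← hx]
          exact List.mem_append_right _ List.mem_cons_self
        exact absurd hmem (by decide)
  · rintro ⟨t, ht⟩
    exact ⟨t ++ '[' :: post, by rw [← ht]; simp⟩

-- dropWhile helpers for the strip lemmas
lemma pv_rstrip_length_le (l : List Char) : (PySem.Chars.rstrip l).length ≤ l.length := by
  have := List.length_dropWhile_le (p := PySem.Chars.isspace) (l := l.reverse)
  simpa [PySem.Chars.rstrip] using this

lemma pv_dropWhile_head (p : Char → Bool) (a : Char) (t : List Char)
    (h : List.dropWhile p (a :: t) = a :: t) : p a = false := by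
  by_contra hb
  have hp : p a = true := by simpa using hb
  rw [List.dropWhile_cons, if_pos hp] at h
  have hle := List.length_dropWhile_le (p := p) (l := t)
  rw [h] at hle
  simp at hle

lemma pv_dropWhile_append (p : Char → Bool) (a b : List Char)
    (ha : List.dropWhile p a = a) (hb : List.dropWhile p b = b) :
    List.dropWhile p (a ++ b) = a ++ b := by
  cases a with
  | nil => simpa using hb
  | cons x t =>
    have hx := pv_dropWhile_head p x t ha
    simp [List.dropWhile_cons, hx]

-- strip facts
lemma pv_lstrip_of_strip (v : List Char) (h : PySem.Chars.strip v = v) : PySem.Chars.lstrip v = v := by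
  have hsuf : PySem.Chars.lstrip v <:+ v := List.dropWhile_suffix _
  have h1 : v.length ≤ (PySem.Chars.lstrip v).length := by
    calc v.length = (PySem.Chars.strip v).length := by rw [h]
      _ = (PySem.Chars.rstrip (PySem.Chars.lstrip v)).length := rfl
      _ ≤ (PySem.Chars.lstrip v).length := pv_rstrip_length_le _
  exact List.IsSuffix.eq_of_length hsuf (le_antisymm (List.IsSuffix.length_le hsuf) h1)

lemma pv_rstrip_of_strip (v : List Char) (h : PySem.Chars.strip v = v) : PySem.Chars.rstrip v = v := by
  have hl := pv_lstrip_of_strip v h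
  calc PySem.Chars.rstrip v = PySem.Chars.rstrip (PySem.Chars.lstrip v) := by rw [hl]
    _ = PySem.Chars.strip v := rfl
    _ = v := h

lemma pv_strip_strip (l : List Char) : PySem.Chars.strip (PySem.Chars.strip l) = PySem.Chars.strip l := by
  set u := PySem.Chars.lstrip l with hu
  have hrep : PySem.Chars.strip l = PySem.Chars.rstrip u := rfl
  have hlu : PySem.Chars.lstrip u = u := by
    simp only [hu, PySem.Chars.lstrip]
    exact List.dropWhile_idempotent _ _
  have hpre : PySem.Chars.rstrip u <+: u := by
    have hs : List.dropWhile PySem.Chars.isspace u.reverse <:+ u.reverse := List.dropWhile_suffix _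
    have := List.reverse_prefix.mpr hs
    simpa [PySem.Chars.rstrip] using this
  have hlr : PySem.Chars.lstrip (PySem.Chars.rstrip u) = PySem.Chars.rstrip u := by
    rcases he : PySem.Chars.rstrip u with _ | ⟨a, t⟩
    · simp [PySem.Chars.lstrip]
    · rw [he] at hpre
      obtain ⟨r, hr⟩ := hpre
      have hau : PySem.Chars.lstrip u = u := hlu
      rw [← hr] at hau
      have hfa : PySem.Chars.isspace a = false := by
        apply pv_dropWhile_head PySem.Chars.isspace a (t ++ r)
        simpa [PySem.Chars.lstrip] using hau
      simp [PySem.Chars.lstrip, List.dropWhile_cons, hfa]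
  have hrr : PySem.Chars.rstrip (PySem.Chars.rstrip u) = PySem.Chars.rstrip u := by
    simp only [PySem.Chars.rstrip, List.reverse_reverse]
    rw [List.dropWhile_idempotent]
  show PySem.Chars.rstrip (PySem.Chars.lstrip (PySem.Chars.rstrip u)) = PySem.Chars.rstrip u
  rw [hlr, hrr]

lemma pv_strip_amp (p : Nat) (v : List Char) (hv : PySem.Chars.strip v = v) :
    PySem.Chars.strip (List.replicate p '&' ++ v) = List.replicate p '&' ++ v := by
  have hl := pv_lstrip_of_strip v hv
  have hr := pv_rstrip_of_strip v hv
  have hdwv : List.dropWhile PySem.Chars.isspace v.reverse = v.reverse := by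
    have := congrArg List.reverse hr
    simpa [PySem.Chars.rstrip] using this
  have hdwrep : List.dropWhile PySem.Chars.isspace (List.replicate p '&') = List.replicate p '&' := by
    cases p with
    | zero => simp
    | succ q =>
      rw [List.replicate_succ, List.dropWhile_cons]
      simp [show PySem.Chars.isspace '&' = false by decide]
  have h1 : PySem.Chars.lstrip (List.replicate p '&' ++ v) = List.replicate p '&' ++ v := by
    cases p with
    | zero => simpa [PySem.Chars.lstrip] using hl
    | succ q =>
      simp only [PySem.Chars.lstrip, List.replicate_succ, List.cons_append, List.dropWhile_cons]
      simp [show PySem.Chars.isspace '&' = false by decide]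
  have h2 : PySem.Chars.rstrip (List.replicate p '&' ++ v) = List.replicate p '&' ++ v := by
    simp only [PySem.Chars.rstrip, List.reverse_append, List.reverse_replicate]
    rw [pv_dropWhile_append _ _ _ hdwv hdwrep]
    simp
  show PySem.Chars.rstrip (PySem.Chars.lstrip _) = _
  rw [h1, h2]

-- every value in the type table is already stripped
lemma pv_table_stripped : ∀ pr ∈ pvCToV.items, PySem.Chars.strip pr.2.toList = pr.2.toList := by
  decide

lemma pv_getD_stripped (k : String) (hk : PySem.Chars.strip k.toList = k.toList) :
    PySem.Chars.strip (pvCToV.getD k k).toList = (pvCToV.getD k k).toList := by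
  unfold PySem.Dict.getD
  cases hq : pvCToV.get? k with
  | none => simpa using hk
  | some v =>
    simp only [Option.getD_some]
    unfold PySem.Dict.get? at hq
    rcases Option.map_eq_some_iff.mp hq with ⟨pr, hfind, hp2⟩
    have hmem := List.mem_of_find?_eq_some hfind
    have := pv_table_stripped pr hmem
    rw [hp2] at this
    exact this

-- A's join over "" as a flatten
lemma pv_join_nil_sep (parts : List (List Char)) : PySem.Chars.join [] parts = parts.flatten := by
  induction parts with
  | nil => simp [PySem.Chars.join, List.intercalate]
  | cons a t ih =>
    cases t with
    | nil => simp [PySem.Chars.join, List.intercalate]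
    | cons b r =>
      rw [PySem.Chars.join_cons_cons]
      simp [ih]

-- Str-level assembly facts
lemma pv_isIn_mem (c : String) : PySem.Str.isIn "[" c = true ↔ '[' ∈ c.toList := by
  rw [PySem.Str.isIn_iff_infix]
  rw [show ("[" : String).toList = ['['] from rfl]
  exact List.singleton_infix_iff '[' c.toList

lemma pv_split_eq (c : String) :
    (PySem.Str.split? c "[").getD [] = (pvSplitC '[' c.toList).map String.ofList := by
  rw [show PySem.Str.split? c "[" = (PySem.Chars.split? c.toList ['[']).map (List.map String.ofList) from rfl]
  rw [show PySem.Chars.split? c.toList ['['] = some (PySem.Chars.splitOn c.toList ['[']) from rfl]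
  rw [pv_splitOn_single]
  rfl

-- the final strip in A is a no-op
lemma pv_final_strip (P : Nat) (x : String) :
    PySem.Str.strip (String.ofList (List.replicate P '&') ++ pvCToV.getD (PySem.Str.strip x) (PySem.Str.strip x)) =
      String.ofList (List.replicate P '&') ++ pvCToV.getD (PySem.Str.strip x) (PySem.Str.strip x) := by
  apply String.toList_inj.mp
  rw [PySem.Str.toList_strip, String.toList_append, String.toList_ofList]
  have hk : PySem.Chars.strip (PySem.Str.strip x).toList = (PySem.Str.strip x).toList := by
    rw [PySem.Str.toList_strip]
    exact pv_strip_strip x.toList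
  exact pv_strip_amp P _ (pv_getD_stripped _ hk)

-- A's dims string, as the flatten the scanner produces
lemma pv_dims_eq (ss : List (List Char)) :
    (PySem.Str.join "" ((((ss.map (List.filter (fun x => x ≠ ']')))).map String.ofList).map (fun x => "[" ++ x ++ "]"))).toList =
      (ss.map (fun seg => '[' :: (seg.filter (fun x => x ≠ ']') ++ [']']))).flatten := by
  rw [PySem.Str.toList_join]
  rw [show ("" : String).toList = ([] : List Char) from rfl]
  rw [pv_join_nil_sep]
  simp only [List.map_map]
  apply congrArg List.flatten
  apply List.map_congr_left
  intro segl _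
  simp [String.toList_append]

-- startswith at the Chars level
lemma pv_sw (b : String) : (PySem.Str.startswith b "const " = true) ↔ (("const " : String).toList <+: b.toList) := by
  rw [show PySem.Str.startswith b "const " = PySem.Chars.startswith b.toList ("const " : String).toList from rfl]
  exact PySem.Chars.startswith_iff _ _

lemma pv_klen : ("const " : String).toList.length = 6 := by decide

-- A's pointer count over the base equals the count over the const-dropped base
lemma pv_pointers (pre : List Char) :
    PySem.Str.count (String.ofList pre) "*" =
      (if ("const " : String).toList <+: pre then pre.drop 6 else pre).count '*' := by
  rw [show PySem.Str.count (String.ofList pre) "*" = PySem.Chars.count (String.ofList pre).toList ['*'] from rfl]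
  rw [String.toList_ofList, pv_count_single]
  by_cases h : ("const " : String).toList <+: pre
  · rw [if_pos h]
    obtain ⟨t, ht⟩ := h
    rw [← ht, ← pv_klen, List.drop_left, List.count_append]
    rw [show List.count '*' ("const " : String).toList = 0 from by decide]
    omega
  · rw [if_neg h]

-- A's stripped name equals B's stripped kept characters
lemma pv_name (pre : List Char) :
    PySem.Str.strip (PySem.Str.replace (pyRemoveprefix (String.ofList pre) "const ") "*" "") =
      PySem.Str.strip (String.ofList
        ((if ("const " : String).toList <+: pre then pre.drop 6 else pre).filter (fun x => x ≠ '*'))) := by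
  apply congrArg PySem.Str.strip
  apply String.toList_inj.mp
  rw [PySem.Str.toList_replace]
  rw [show ("*" : String).toList = ['*'] from rfl, show ("" : String).toList = ([] : List Char) from rfl]
  rw [pv_replace_single, String.toList_ofList]
  apply congrArg (List.filter _)
  unfold pyRemoveprefix
  by_cases h : ("const " : String).toList <+: pre
  · have hsw : PySem.Str.startswith (String.ofList pre) "const " = true :=
      (pv_sw _).mpr (by simpa using h)
    rw [if_pos hsw, if_pos h]
    simp
  · have hsw : ¬ PySem.Str.startswith (String.ofList pre) "const " = true :=
      fun hw => h (by simpa using (pv_sw _).mp hw)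
    rw [if_neg hsw, if_neg h]
    simp

lemma pv_pointers' (b : String) :
    PySem.Str.count b "*" =
      (if ("const " : String).toList <+: b.toList then b.toList.drop 6 else b.toList).count '*' := by
  conv_lhs => rw [show b = String.ofList b.toList from (String.ofList_toList (s := b)).symm]
  exact pv_pointers b.toList

lemma pv_name' (b : String) :
    PySem.Str.strip (PySem.Str.replace (pyRemoveprefix b "const ") "*" "") =
      PySem.Str.strip (String.ofList
        ((if ("const " : String).toList <+: b.toList then b.toList.drop 6 else b.toList).filter (fun x => x ≠ '*'))) := by
  conv_lhs => rw [show b = String.ofList b.toList from (String.ofList_toList (s := b)).symm]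
  exact pv_name b.toList

-- ===== VERDICT (by name: the statement is the Claim_ definition above) =====
theorem c_type_to_v_type_spec : Claim_equal_c_type_to_v_type := by
  unfold Claim_equal_c_type_to_v_type
  intro c m hdom hpre
  unfold Spec_c_type_to_v_type
  unfold c_type_to_v_type c_type_to_v_type_alt
  by_cases h1 : c = "..."
  · have e1 : (c == "...") = true := by simp [h1]
    rw [if_pos e1, if_pos e1]
  · have e1 : ¬ ((c == "...") = true) := by simpa using h1
    rw [if_neg e1, if_neg e1]
    by_cases h2 : (c == "void *" || c == "const void *") = true
    · rw [if_pos h2, if_pos h2]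
    · rw [if_neg h2, if_neg h2]
      simp only []
      by_cases hbr : PySem.Str.isIn "[" c = true
      · -- '[' occurs in c
        have hm : '[' ∈ c.toList := (pv_isIn_mem c).mp hbr
        obtain ⟨pre, post, hl, hp⟩ := pv_first_bracket c.toList hm
        have hsplitc : pvSplitC '[' c.toList = pre :: pvSplitC '[' post := by
          rw [hl]; exact pvSplitC_decomp pre post hp
        rw [if_pos hbr]
        have hsplit : (PySem.Str.split? c "[").getD [] = (pre :: pvSplitC '[' post).map String.ofList := by
          rw [pv_split_eq, hsplitc]
        have hrepl : (PySem.Str.replace c "]" "").toList = c.toList.filter (fun x => x ≠ ']') := by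
          rw [show (PySem.Str.replace c "]" "").toList =
              PySem.Chars.replace c.toList (("]" : String).toList) (("" : String).toList) from
            PySem.Str.toList_replace _ _ _]
          rw [show ("]" : String).toList = [']'] from rfl, show ("" : String).toList = ([] : List Char) from rfl]
          exact pv_replace_single _ _
        have hsplit2 : (PySem.Str.split? (PySem.Str.replace c "]" "") "[").getD [] =
            ((pre :: pvSplitC '[' post).map (List.filter (fun x => x ≠ ']'))).map String.ofList := by
          rw [pv_split_eq, hrepl, pvSplitC_filter '[' ']' (by decide), hsplitc]
        rw [hsplit, hsplit2]
        have hslice1 : PySem.List.slice (((pre :: pvSplitC '[' post).map (List.filter (fun x => x ≠ ']'))).map String.ofList) (some 1) none =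
            ((pvSplitC '[' post).map (List.filter (fun x => x ≠ ']'))).map String.ofList := by
          simp [PySem.List.slice_from_one]
        have hget1 : (PySem.List.pyGet? ((pre :: pvSplitC '[' post).map String.ofList) 0).getD "" = String.ofList pre := by
          simp [pysem]
        rw [hslice1, hget1]
        have hlen : (((pvSplitC '[' post).map (List.filter (fun x => x ≠ ']'))).map String.ofList).length > 0 := by
          rcases he : pvSplitC '[' post with _ | ⟨s, ss⟩
          · exact absurd he (pvSplitC_ne_nil _ _)
          · simp
        rw [if_pos hlen]
        rw [pv_final_strip, pv_pointers pre, pv_name pre]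
        have hdims : PySem.Str.join "" ((((pvSplitC '[' post).map (List.filter (fun x => x ≠ ']'))).map String.ofList).map (fun s => "[" ++ s ++ "]")) =
            String.ofList ('[' :: pvAltDimsGo post) := by
          apply String.toList_inj.mp
          rw [pv_dims_eq, String.toList_ofList, pvAltDims_flatten]
        rw [hdims]
        by_cases hK : ("const " : String).toList <+: c.toList
        · have hsw : PySem.Str.startswith c "const " = true := (pv_sw c).mpr hK
          rw [if_pos hsw]
          have hKpre : ("const " : String).toList <+: pre := (pv_const_transfer pre post).mp (hl ▸ hK)
          obtain ⟨t0, ht0⟩ := hKpre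
          have hnt0 : '[' ∉ t0 := fun hmem => hp (ht0 ▸ List.mem_append_right _ hmem)
          have hsl : (PySem.Str.slice c (some 6) none).toList = t0 ++ '[' :: post := by
            rw [show (PySem.Str.slice c (some 6) none).toList = c.toList.drop 6 from by simp [pysem]]
            rw [hl, ← ht0, List.append_assoc, ← pv_klen, List.drop_left]
          rw [hsl, pvAltScan_bracket t0 post 0 [] hnt0]
          have hcd : (if ("const " : String).toList <+: pre then pre.drop 6 else pre) = t0 := by
            rw [if_pos ⟨t0, ht0⟩, ← ht0, ← pv_klen, List.drop_left]
          rw [hcd]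
          simp only [Nat.zero_add, List.nil_append]
          rw [String.append_assoc]
        · have hsw : ¬ PySem.Str.startswith c "const " = true := fun hw => hK ((pv_sw c).mp hw)
          rw [if_neg hsw]
          have hscan : pvAltScan c.toList 0 [] =
              (0 + pre.count '*', [] ++ pre.filter (fun x => x ≠ '*'), '[' :: pvAltDimsGo post) := by
            rw [hl]; exact pvAltScan_bracket pre post 0 [] hp
          rw [hscan]
          have hcd : (if ("const " : String).toList <+: pre then pre.drop 6 else pre) = pre := by
            rw [if_neg (fun hw => hK (hl ▸ hw.trans ⟨'[' :: post, rfl⟩))]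
          rw [hcd]
          simp only [Nat.zero_add, List.nil_append]
          rw [String.append_assoc]
      · -- no '[' in c
        have hnm : '[' ∉ c.toList := fun hmem => hbr ((pv_isIn_mem c).mpr hmem)
        rw [if_neg hbr]
        simp only [List.length_nil, gt_iff_lt, Nat.lt_irrefl, if_false]
        rw [pv_final_strip, pv_pointers' c, pv_name' c]
        by_cases hK : ("const " : String).toList <+: c.toList
        · have hsw : PySem.Str.startswith c "const " = true := (pv_sw c).mpr hK
          rw [if_pos hsw]
          obtain ⟨t0, ht0⟩ := hK
          have hnt0 : '[' ∉ t0 := fun hmem => hnm (ht0 ▸ List.mem_append_right _ hmem)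
          have hsl : (PySem.Str.slice c (some 6) none).toList = t0 := by
            rw [show (PySem.Str.slice c (some 6) none).toList = c.toList.drop 6 from by simp [pysem]]
            rw [← ht0, ← pv_klen, List.drop_left]
          rw [hsl, pvAltScan_no_bracket t0 0 [] hnt0]
          have hcd : (if ("const " : String).toList <+: c.toList then c.toList.drop 6 else c.toList) = t0 := by
            rw [if_pos ⟨t0, ht0⟩, ← ht0, ← pv_klen, List.drop_left]
          rw [hcd]
          simp only [Nat.zero_add, List.nil_append]
          rw [show String.ofList ([] : List Char) = "" from rfl]
          simp
        · have hsw : ¬ PySem.Str.startswith c "const " = true := fun hw => hK ((pv_sw c).mp hw)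
          rw [if_neg hsw]
          rw [pvAltScan_no_bracket c.toList 0 [] hnm]
          have hcd : (if ("const " : String).toList <+: c.toList then c.toList.drop 6 else c.toList) = c.toList := by
            rw [if_neg hK]
          rw [hcd]
          simp only [Nat.zero_add, List.nil_append]
          rw [show String.ofList ([] : List Char) = "" from rfl]
          simp
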